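-- pv_equiv track=rewrite | github.com/boenomarcus/gedi_iffsc | lidar_mongo.py | match_product_files
-- ===== SOURCE A (Python) =====
-- def match_product_files(files, versions):
--     """
--     get dictionary with matching L1B, L2A and L2B files
--     """
--
--     # Create empty dictionary to store results
--     gedi_dict = {}
--
--     # iterate through versions
--     for version in versions:
--
--         # Create nested dictionary for version
--         gedi_dict[version] = {}
--
--         # Get files for version
--         version_files = [f for f in files if f.endswith(version + '.h5')]
--
--         # Get L1B files for version
--         l1b_files = [
--             f for f in version_files if f.startswith('processed_GEDI01_B')
--             ]
--
--         # Iterate through L1B files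
--         for l1b_file in l1b_files:
--
--             # Get match parameter
--             str2match = l1b_file[19:46]
--
--             # Get matching L2A and L2B files
--             matched_files = [f for f in files if f[19:46] == str2match]
--
--             # Append files to dictionary
--             gedi_dict[version][str2match] = matched_files
--
--     # Return results
--     return gedi_dict
-- ===== SOURCE B (Python) =====
-- def match_product_files(files, versions):
--     """
--     get dictionary with matching L1B, L2A and L2B files
--     (one-pass grouping by f[19:46], then direct lookup per L1B file)
--     """
--     # Group all files by their match parameter in a single pass
--     groups = {}
--     for f in files:
--         groups.setdefault(f[19:46], []).append(f)
--
--     # Build per-version dictionaries by direct lookup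
--     result = {}
--     for version in versions:
--         inner = {}
--         for f in files:
--             if f.endswith(version + '.h5') and f.startswith('processed_GEDI01_B'):
--                 inner[f[19:46]] = groups[f[19:46]]
--         result[version] = inner
--     return result
-- ===== Notes on version B (the rewrite author's own statement) =====
-- stated objective: alternative
-- what changed: B builds a dict grouping all files by f[19:46] in one pass and looks the group up per L1B file, replacing A's rescan of the whole file list for every L1B file of every version.
import Mathlib
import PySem

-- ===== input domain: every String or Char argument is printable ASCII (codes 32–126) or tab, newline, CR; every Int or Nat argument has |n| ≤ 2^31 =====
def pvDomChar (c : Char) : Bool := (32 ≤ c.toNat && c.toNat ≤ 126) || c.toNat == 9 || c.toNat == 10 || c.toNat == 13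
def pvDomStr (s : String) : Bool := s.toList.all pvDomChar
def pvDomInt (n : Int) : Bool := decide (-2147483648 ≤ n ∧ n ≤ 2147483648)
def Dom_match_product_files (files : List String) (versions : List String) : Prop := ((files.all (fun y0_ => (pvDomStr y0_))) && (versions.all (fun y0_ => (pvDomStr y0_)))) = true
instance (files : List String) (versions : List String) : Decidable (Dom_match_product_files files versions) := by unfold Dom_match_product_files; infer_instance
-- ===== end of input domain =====

-- B groups all files by f[19:46] in ONE pass and looks the group up per L1B file,
-- replacing A's rescan of the whole file list for every L1B file of every version (alternative algorithm).

-- ===== PORT A =====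
def match_product_files (files : List String) (versions : List String) : List (String × List (String × List String)) :=
  let gedi_dict : PySem.Dict String (PySem.Dict String (List String)) :=
    versions.foldl (fun gd version =>
      -- gedi_dict[version] = {}
      let gd := gd.insert version (PySem.Dict.empty : PySem.Dict String (List String))
      let version_files := files.filter (fun f => PySem.Str.endswith f (version ++ ".h5"))
      let l1b_files := version_files.filter (fun f => PySem.Str.startswith f "processed_GEDI01_B")
      l1b_files.foldl (fun gd l1b_file =>
        let str2match := PySem.Str.slice l1b_file (some 19) (some 46)
        let matched_files := files.filter (fun f => PySem.Str.slice f (some 19) (some 46) == str2match)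
        -- gedi_dict[version][str2match] = matched_files  (in-place update of the inner dict)
        gd.modify version PySem.Dict.empty (fun inner => inner.insert str2match matched_files)) gd)
      PySem.Dict.empty
  gedi_dict.items.map (fun p => (p.1, p.2.items))

-- ===== PORT B =====
def match_product_files_alt (files : List String) (versions : List String) : List (String × List (String × List String)) :=
  -- groups.setdefault(f[19:46], []).append(f)  ≡  modify key [] (· ++ [f])
  let groups : PySem.Dict String (List String) :=
    files.foldl (fun d f => d.modify (PySem.Str.slice f (some 19) (some 46)) [] (· ++ [f])) PySem.Dict.empty
  let result : PySem.Dict String (PySem.Dict String (List String)) :=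
    versions.foldl (fun res version =>
      res.insert version
        (files.foldl (fun inner f =>
          if PySem.Str.endswith f (version ++ ".h5") && PySem.Str.startswith f "processed_GEDI01_B" then
            -- groups[f[19:46]] : the key is always present (f is in its own group); getD is exact here
            inner.insert (PySem.Str.slice f (some 19) (some 46))
              (groups.getD (PySem.Str.slice f (some 19) (some 46)) [])
          else inner) (PySem.Dict.empty : PySem.Dict String (List String)))) PySem.Dict.empty
  result.items.map (fun p => (p.1, p.2.items))

-- ===== PRECONDITION & SPEC =====
def Spec_match_product_files (files : List String) (versions : List String) (out : List (String × List (String × List String))) : Prop := out = match_product_files_alt files versions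
instance (files : List String) (versions : List String) (out : List (String × List (String × List String))) : Decidable (Spec_match_product_files files versions out) := by unfold Spec_match_product_files; infer_instance

-- ===== CLAIM (what is proved, stated in full; the proofs are below) =====
def Claim_equal_match_product_files : Prop := ∀ (files : List String) (versions : List String), Dom_match_product_files files versions → Spec_match_product_files files versions (match_product_files files versions)

-- ===== LEMMAS AND PROOFS =====

-- B's groups dict: looking up k yields exactly the files whose f[19:46] equals k (A's rescan result).
theorem pv_groups_getD (files : List String) (k : String) :
    (files.foldl (fun d f => d.modify (PySem.Str.slice f (some 19) (some 46)) [] (· ++ [f]))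
      (PySem.Dict.empty : PySem.Dict String (List String))).getD k []
    = files.filter (fun f => PySem.Str.slice f (some 19) (some 46) == k) := by
  have h := PySem.Dict.getD_foldl_modify_append
    (files.map (fun f => (PySem.Str.slice f (some 19) (some 46), f)))
    (PySem.Dict.empty : PySem.Dict String (List String)) k
  rw [List.foldl_map] at h
  simpa [List.filter_map, Function.comp_def] using h

-- A's inner loop (modify version inside the outer dict) equals one insert of the inner fold.
theorem pv_inner_fold (v : String) (g : String → String) (m : String → List String) :
    ∀ (L : List String) (gd : PySem.Dict String (PySem.Dict String (List String)))
      (inner : PySem.Dict String (List String)),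
    L.foldl (fun gd f => gd.modify v PySem.Dict.empty (fun inn => inn.insert (g f) (m f)))
        (gd.insert v inner)
    = gd.insert v (L.foldl (fun inn f => inn.insert (g f) (m f)) inner) := by
  intro L
  induction L with
  | nil => intro gd inner; rfl
  | cons f L ih =>
    intro gd inner
    simp only [List.foldl_cons, PySem.Dict.modify, PySem.Dict.getD_insert_self,
      PySem.Dict.insert_insert_self]
    exact ih gd (inner.insert (g f) (m f))

-- ===== VERDICT (by name: the statement is the Claim_ definition above) =====
theorem match_product_files_spec : Claim_equal_match_product_files := by
  intro files versions _
  show match_product_files files versions = match_product_files_alt files versions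
  unfold match_product_files match_product_files_alt
  dsimp only
  congr 2
  apply List.foldl_ext
  intro gd version _
  rw [List.filter_filter, pv_inner_fold version
      (fun f => PySem.Str.slice f (some 19) (some 46))
      (fun l1b => files.filter (fun f =>
        PySem.Str.slice f (some 19) (some 46) == PySem.Str.slice l1b (some 19) (some 46))),
    ← List.foldl_filter]
  simp only [pv_groups_getD]
  exact congrArg (gd.insert version)
    (congrArg (List.foldl _ PySem.Dict.empty)
      (List.filter_congr (fun f _ => Bool.and_comm _ _)))
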